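-- pv_equiv track=rewrite | github.com/bhuvanesh00103/ADF-intern | uniquewords_from_file.py | find_unique_words
-- ===== SOURCE A (Python) =====
-- def find_unique_words(l):
--     d = {}
--     for i in l:
--         if i in d:
--             d[i]+=1
--         else:
--             d[i]=1
--     l = []
--     for i in d:
--         if d[i]==1:
--             l.append(i)
--     return l
-- ===== SOURCE B (Python) =====
-- def find_unique_words(l):
--     if not l:
--         return []
--     head, rest = l[0], l[1:]
--     others = [w for w in rest if w != head]
--     if len(others) == len(rest):
--         return [head] + find_unique_words(others)
--     return find_unique_words(others)
-- ===== Notes on version B (the rewrite author's own statement) =====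
-- stated objective: alternative
-- what changed: Replaces A's dict-counting two-pass loop by a partition recursion: take the head, strip all its duplicates from the tail, keep the head only if none were stripped, and recurse on the stripped tail; no counts or dicts are maintained.
import Mathlib
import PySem

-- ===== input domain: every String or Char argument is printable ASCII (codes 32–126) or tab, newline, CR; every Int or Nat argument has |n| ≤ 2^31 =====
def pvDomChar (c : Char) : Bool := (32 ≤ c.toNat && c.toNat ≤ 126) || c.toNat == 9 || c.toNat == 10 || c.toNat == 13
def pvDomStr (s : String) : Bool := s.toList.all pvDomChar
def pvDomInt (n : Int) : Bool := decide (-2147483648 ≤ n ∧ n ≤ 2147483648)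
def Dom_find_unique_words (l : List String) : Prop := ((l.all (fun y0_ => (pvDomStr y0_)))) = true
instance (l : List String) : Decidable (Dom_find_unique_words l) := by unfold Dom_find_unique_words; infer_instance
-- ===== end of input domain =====

-- B replaces A's dict-counting two-pass loop by a head/duplicate-stripping partition recursion (alternative decomposition; not faster).

-- ===== PORT A =====
def find_unique_words (l : List String) : List String :=
  let d : PySem.Dict String Int :=
    l.foldl (fun d i => if d.contains i then d.modify i 0 (· + 1) else d.insert i 1)
      PySem.Dict.empty
  d.keys.foldl (fun acc i => if d.getD i 0 == 1 then acc ++ [i] else acc) []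

-- ===== PORT B =====
def find_unique_words_alt : List String → List String
  | [] => []
  | head :: rest =>
    let others := rest.filter (fun w => w != head)
    if others.length = rest.length then head :: find_unique_words_alt others
    else find_unique_words_alt others
termination_by l => l.length
decreasing_by
  all_goals
    simp only [List.length_cons, List.length_unattach]
    exact Nat.lt_succ_of_le (le_trans (List.length_filter_le _ _) (by simp))

-- ===== PRECONDITION & SPEC =====
def Spec_find_unique_words (l : List String) (out : List String) : Prop := out = find_unique_words_alt l
instance (l : List String) (out : List String) : Decidable (Spec_find_unique_words l out) := by unfold Spec_find_unique_words; infer_instance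

-- ===== CLAIM (what is proved, stated in full; the proofs are below) =====
def Claim_equal_find_unique_words : Prop := ∀ (l : List String), Dom_find_unique_words l → Spec_find_unique_words l (find_unique_words l)

-- ===== LEMMAS AND PROOFS =====

-- A's counting loop builds exactly Counter(l)
theorem pv_dict_eq (l : List String) :
    l.foldl (fun d i => if d.contains i then d.modify i 0 (· + 1) else d.insert i 1)
      PySem.Dict.empty = PySem.Dict.counter l := by
  rw [PySem.Dict.counter_eq_foldl]
  congr 1
  funext d i
  by_cases h : d.contains i = true
  · simp [h]
  · simp only [Bool.not_eq_true] at h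
    simp [h, PySem.Dict.modify, PySem.Dict.getD_of_not_contains d 0 h]

-- filtering the first-occurrence list by a predicate that only holds on elements occurring once
-- agrees with filtering the whole list
theorem pv_filter_ofList (p : String → Bool) :
    ∀ (l : List String), (∀ x ∈ l, p x = true → List.count x l = 1) →
      (PySem.Set.ofList l).filter p = l.filter p := by
  intro l
  induction l with
  | nil => intro _; rfl
  | cons x xs ih =>
    intro h
    rw [PySem.Set.ofList_cons]
    by_cases hp : p x = true
    · have hcx : List.count x (x :: xs) = 1 := h x (List.mem_cons_self) hp
      have hx : x ∉ xs := by
        have := List.count_cons_self (a := x) (l := xs)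
        have hz : List.count x xs = 0 := by omega
        exact List.count_eq_zero.mp hz
      have hd : (PySem.Set.ofList xs).discard x = PySem.Set.ofList xs := by
        unfold PySem.Set.discard
        apply List.filter_eq_self.mpr
        intro y hy
        have : y ∈ xs := (PySem.Set.mem_ofList xs y).mp hy
        have : y ≠ x := fun e => hx (e ▸ this)
        simp [this]
      rw [hd]
      have hrec : (PySem.Set.ofList xs).filter p = xs.filter p := by
        apply ih
        intro y hy hpy
        have := h y (List.mem_cons_of_mem x hy) hpy
        have hyx : ¬ (y = x) := fun e => hx (e ▸ hy)
        have hxy : ¬ (x = y) := fun e => hyx e.symm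
        simp [hxy] at this
        exact this
      simp [hp, hrec]
    · simp only [Bool.not_eq_true] at hp
      unfold PySem.Set.discard
      rw [List.filter_cons_of_neg (by simp [hp])]
      rw [List.filter_filter]
      have hfe : (PySem.Set.ofList xs).filter (fun a => p a && !a == x)
          = (PySem.Set.ofList xs).filter p := by
        apply List.filter_congr
        intro y _
        by_cases hpy : p y = true
        · have hyx : y ≠ x := fun e => by rw [e, hp] at hpy; exact Bool.false_ne_true hpy
          simp [hpy, hyx]
        · simp only [Bool.not_eq_true] at hpy
          simp [hpy]
      rw [hfe]
      have hrec : (PySem.Set.ofList xs).filter p = xs.filter p := by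
        apply ih
        intro y hy hpy
        have := h y (List.mem_cons_of_mem x hy) hpy
        have hyx : ¬ (y = x) := fun e => by rw [e, hp] at hpy; exact Bool.false_ne_true hpy
        have hxy : ¬ (x = y) := fun e => hyx e.symm
        simp [hxy] at this
        exact this
      rw [hrec, List.filter_cons_of_neg (by simp [hp])]

-- A's port computes l filtered by "occurs exactly once in l"
theorem pv_A_eq_filter (l : List String) :
    find_unique_words l = l.filter (fun w => List.count w l == 1) := by
  unfold find_unique_words
  rw [pv_dict_eq, PySem.List.foldl_append_if_eq_filter, List.nil_append,
    PySem.Dict.keys_counter]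
  have hpred : ∀ y, ((PySem.Dict.counter l).getD y 0 == 1) = (List.count y l == 1) := by
    intro y
    rw [PySem.Dict.getD_counter]
    by_cases hc : List.count y l = 1
    · simp [hc]
    · have : ((List.count y l : Int) = 1) ↔ False := by
        constructor
        · intro hh; exact hc (by exact_mod_cast hh)
        · exact False.elim
      simp [hc, this]
  have := pv_filter_ofList (fun y => (PySem.Dict.counter l).getD y 0 == 1) l ?_
  · rw [this]
    apply List.filter_congr
    intro y _
    exact hpred y
  · intro x _ hx
    have hx : ((PySem.Dict.counter l).getD x 0 == 1) = true := hx
    rw [hpred x] at hx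
    exact beq_iff_eq.mp hx

-- B's recursion computes the same filter, by strong induction on length
theorem pv_B_eq_filter : ∀ (n : Nat) (l : List String), l.length ≤ n →
    find_unique_words_alt l = l.filter (fun w => List.count w l == 1) := by
  intro n
  induction n with
  | zero =>
    intro l hl
    have : l = [] := List.eq_nil_of_length_eq_zero (Nat.le_zero.mp hl)
    subst this; simp [find_unique_words_alt]
  | succ n ih =>
    intro l hl
    cases l with
    | nil => simp [find_unique_words_alt]
    | cons head rest =>
      have hlen : (rest.filter (fun w => w != head)).length ≤ n := by
        have := List.length_filter_le (fun w => w != head) rest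
        simp only [List.length_cons, Nat.succ_le_succ_iff] at hl
        omega
      rw [find_unique_words_alt]
      set others := rest.filter (fun w => w != head) with hoth
      have hrec := ih others hlen
      -- count of any w ≠ head is the same in rest and in others
      have hcnt : ∀ w, w ≠ head → List.count w others = List.count w rest := by
        intro w hw
        rw [hoth, List.count_filter]
        simp [bne_iff_ne, hw]
      -- filtering rest by the top-level predicate = filtering others by it
      have hfre : rest.filter (fun w => List.count w (head :: rest) == 1)
          = others.filter (fun w => List.count w (head :: rest) == 1) := by
        by_cases hmem : head ∈ rest
        · rw [hoth, List.filter_filter]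
          apply (List.filter_congr ?_).symm
          intro y _
          by_cases hy : y = head
          · subst hy
            have h1 : 1 ≤ List.count y rest := List.one_le_count_iff.mpr hmem
            have hf : (List.count y (y :: rest) == 1) = false := by
              rw [List.count_cons_self]; simp; omega
            rw [List.count_cons_self] at hf ⊢
            simp
            omega
          · simp [bne_iff_ne, hy]
        · have : others = rest := by
            rw [hoth]; apply List.filter_eq_self.mpr
            intro y hy
            have : y ≠ head := fun e => hmem (e ▸ hy)
            simp [this]
          rw [this]
      -- the recursive result rewritten to the top-level predicate
      have hrec' : find_unique_words_alt others
          = others.filter (fun w => List.count w (head :: rest) == 1) := by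
        rw [hrec]
        apply List.filter_congr
        intro y hy
        have hyh : y ≠ head := by
          have := List.of_mem_filter hy
          exact bne_iff_ne.mp this
        rw [hcnt y hyh]
        simp [Ne.symm hyh]
      by_cases hcase : others.length = rest.length
      · -- head not in rest: head is kept
        have hmem : head ∉ rest := by
          intro hmem
          have := (List.length_filter_eq_length_iff ..).mp (hoth ▸ hcase)
          have := this head hmem
          simp at this
        have hph : (List.count head (head :: rest) == 1) = true := by
          rw [List.count_cons_self, List.count_eq_zero.mpr hmem]; simp
        simp only [if_pos hcase, List.filter_cons, hph, if_pos]
        rw [hrec', hfre]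
      · have hmem : head ∈ rest := by
          by_contra hmem
          apply hcase
          rw [hoth]
          congr 1
          apply List.filter_eq_self.mpr
          intro y hy
          have : y ≠ head := fun e => hmem (e ▸ hy)
          simp [this]
        have hph : (List.count head (head :: rest) == 1) = false := by
          have h1 : 1 ≤ List.count head rest := List.one_le_count_iff.mpr hmem
          rw [List.count_cons_self]
          simp; omega
        simp only [if_neg hcase, List.filter_cons, hph]
        rw [hrec', hfre]
        simp

-- ===== VERDICT (by name: the statement is the Claim_ definition above) =====
theorem find_unique_words_spec : Claim_equal_find_unique_words := by
  intro l _
  unfold Spec_find_unique_words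
  rw [pv_A_eq_filter, pv_B_eq_filter l.length l (Nat.le_refl _)]
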